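-- pv_equiv track=rewrite | github.com/amelia751/brand-health-index | cloud-functions/cfpb-fetcher/main.py | get_brand_id_from_company
-- ===== SOURCE A (Python) =====
-- from typing import List, Dict, Any, Optional
--
-- CFPB_COMPANY_MAPPING = {
--     'chase': [
--         'JPMORGAN CHASE & CO.'
--     ],
--     'bank_of_america': [
--         'BANK OF AMERICA, NATIONAL ASSOCIATION'
--     ],
--     'wells_fargo': [
--         'WELLS FARGO & COMPANY'
--     ],
--     'capital_one': [
--         'CAPITAL ONE FINANCIAL CORPORATION'
--     ],
--     'citibank': [
--         'CITIBANK, N.A.'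
--     ],
--     'pnc': [
--         'PNC Bank N.A.'
--     ],
--     'santander': [
--         'SANTANDER BANK, NATIONAL ASSOCIATION',
--         'SANTANDER HOLDINGS USA, INC.'
--     ],
--     # These need to be verified with more CFPB data
--     'td_bank': [
--         'TD BANK USA, NATIONAL ASSOCIATION'
--     ],
--     'citizens_bank': [
--         'CITIZENS BANK, NATIONAL ASSOCIATION'
--     ],
--     'mt_bank': [
--         'M&T BANK CORPORATION'
--     ],
--     'keybank': [
--         'KEYBANK NATIONAL ASSOCIATION'
--     ],
--     'regions_bank': [
--         'REGIONS BANK'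
--     ],
--     'truist': [
--         'TRUIST BANK'
--     ]
-- }
--
-- def get_brand_id_from_company(company_name: str) -> Optional[str]:
--     """Map CFPB company name to our standardized brand_id"""
--     if not company_name:
--         return None
--
--     # Check exact matches first (case-insensitive)
--     for brand_id, company_names in CFPB_COMPANY_MAPPING.items():
--         for cfpb_name in company_names:
--             if company_name.upper() == cfpb_name.upper():
--                 return brand_id
--
--     # Check partial matches as fallback
--     company_upper = company_name.upper()
--     for brand_id, company_names in CFPB_COMPANY_MAPPING.items():
--         for cfpb_name in company_names:
--             if cfpb_name.upper() in company_upper or company_upper in cfpb_name.upper():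
--                 return brand_id
--
--     return None
-- ===== SOURCE B (Python) =====
-- from typing import List, Dict, Any, Optional
--
-- CFPB_COMPANY_MAPPING = {
--     'chase': [
--         'JPMORGAN CHASE & CO.'
--     ],
--     'bank_of_america': [
--         'BANK OF AMERICA, NATIONAL ASSOCIATION'
--     ],
--     'wells_fargo': [
--         'WELLS FARGO & COMPANY'
--     ],
--     'capital_one': [
--         'CAPITAL ONE FINANCIAL CORPORATION'
--     ],
--     'citibank': [
--         'CITIBANK, N.A.'
--     ],
--     'pnc': [
--         'PNC Bank N.A.'
--     ],
--     'santander': [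
--         'SANTANDER BANK, NATIONAL ASSOCIATION',
--         'SANTANDER HOLDINGS USA, INC.'
--     ],
--     'td_bank': [
--         'TD BANK USA, NATIONAL ASSOCIATION'
--     ],
--     'citizens_bank': [
--         'CITIZENS BANK, NATIONAL ASSOCIATION'
--     ],
--     'mt_bank': [
--         'M&T BANK CORPORATION'
--     ],
--     'keybank': [
--         'KEYBANK NATIONAL ASSOCIATION'
--     ],
--     'regions_bank': [
--         'REGIONS BANK'
--     ],
--     'truist': [
--         'TRUIST BANK'
--     ]
-- }
--
--
-- def get_brand_id_from_company(company_name: str) -> Optional[str]: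
--     """Map CFPB company name to our standardized brand_id.
--
--     Single pass: return immediately on an exact (case-insensitive) match;
--     remember the first partial (substring either way) match as a fallback.
--     An exact match anywhere still wins over an earlier partial match, because
--     the fallback is only used once the whole table has been scanned."""
--     if not company_name:
--         return None
--     cu = company_name.upper()
--     partial = None
--     for brand_id, company_names in CFPB_COMPANY_MAPPING.items():
--         for cfpb_name in company_names:
--             nu = cfpb_name.upper()
--             if cu == nu:
--                 return brand_id
--             if partial is None and (nu in cu or cu in nu):
--                 partial = brand_id
--     return partial
-- ===== Notes on version B (the rewrite author's own statement) =====
-- stated objective: simpler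
-- what changed: B makes a single pass over the mapping with a first-partial-match accumulator (returning immediately on an exact match, falling back to the recorded partial after the scan), instead of A's two staged full scans of the table; exact-anywhere still beats partial-earlier because the accumulator is only consulted after the whole scan.
import Mathlib
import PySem

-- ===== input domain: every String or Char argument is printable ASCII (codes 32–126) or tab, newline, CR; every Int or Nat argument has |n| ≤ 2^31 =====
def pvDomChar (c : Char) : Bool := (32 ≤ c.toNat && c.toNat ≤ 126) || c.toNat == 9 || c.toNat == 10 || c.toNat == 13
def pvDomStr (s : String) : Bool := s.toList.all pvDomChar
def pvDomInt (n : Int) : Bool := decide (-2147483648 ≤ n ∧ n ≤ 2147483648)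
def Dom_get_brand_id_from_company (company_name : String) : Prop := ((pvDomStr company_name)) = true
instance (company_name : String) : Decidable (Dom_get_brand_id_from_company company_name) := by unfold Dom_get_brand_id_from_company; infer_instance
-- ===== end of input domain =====

-- B scans the mapping once, returning on an exact match and keeping the first partial match
-- as a fallback, instead of A's two staged full scans (simpler; return value proved equal).

-- ===== PORT A =====
def pvMapping : List (String × List String) :=
  [("chase", ["JPMORGAN CHASE & CO."]),
   ("bank_of_america", ["BANK OF AMERICA, NATIONAL ASSOCIATION"]),
   ("wells_fargo", ["WELLS FARGO & COMPANY"]),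
   ("capital_one", ["CAPITAL ONE FINANCIAL CORPORATION"]),
   ("citibank", ["CITIBANK, N.A."]),
   ("pnc", ["PNC Bank N.A."]),
   ("santander", ["SANTANDER BANK, NATIONAL ASSOCIATION", "SANTANDER HOLDINGS USA, INC."]),
   ("td_bank", ["TD BANK USA, NATIONAL ASSOCIATION"]),
   ("citizens_bank", ["CITIZENS BANK, NATIONAL ASSOCIATION"]),
   ("mt_bank", ["M&T BANK CORPORATION"]),
   ("keybank", ["KEYBANK NATIONAL ASSOCIATION"]),
   ("regions_bank", ["REGIONS BANK"]),
   ("truist", ["TRUIST BANK"])]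

-- A's first loop: exact case-insensitive match, first hit wins (inner loop = findSome? over the names).
def pvFindExactA (m : List (String × List String)) (company_name : String) : Option String :=
  match m with
  | [] => none
  | (brand_id, company_names) :: rest =>
    match company_names.findSome? (fun cfpb_name =>
        if PySem.Str.upper company_name == PySem.Str.upper cfpb_name then some brand_id else none) with
    | some r => some r
    | none => pvFindExactA rest company_name

-- A's second loop: partial (substring either way) match against company_upper.
def pvFindPartialA (m : List (String × List String)) (company_upper : String) : Option String :=
  match m with
  | [] => none
  | (brand_id, company_names) :: rest =>
    match company_names.findSome? (fun cfpb_name =>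
        if PySem.Str.isIn (PySem.Str.upper cfpb_name) company_upper
           || PySem.Str.isIn company_upper (PySem.Str.upper cfpb_name) then some brand_id else none) with
    | some r => some r
    | none => pvFindPartialA rest company_upper

def get_brand_id_from_company (company_name : String) : Option String :=
  if company_name == "" then none
  else
    match pvFindExactA pvMapping company_name with
    | some brand_id => some brand_id
    | none => pvFindPartialA pvMapping (PySem.Str.upper company_name)

-- ===== PORT B =====
-- B's inner loop over one brand's names: Sum.inl r  = the Python `return` fired with r,
-- Sum.inr acc = the loop finished with `partial` accumulator acc.
def pvScanNames (names : List String) (brand_id cu : String) (partl : Option String) :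
    (Option String) ⊕ (Option String) :=
  match names with
  | [] => Sum.inr partl
  | cfpb_name :: rest =>
    let nu := PySem.Str.upper cfpb_name
    if cu == nu then Sum.inl (some brand_id)
    else pvScanNames rest brand_id cu
      (if partl.isNone && (PySem.Str.isIn nu cu || PySem.Str.isIn cu nu) then some brand_id else partl)

-- B's outer loop: thread the `partial` accumulator through the brands; early return propagates.
def pvScanMapping (m : List (String × List String)) (cu : String) (partl : Option String) :
    Option String :=
  match m with
  | [] => partl
  | (brand_id, company_names) :: rest =>
    match pvScanNames company_names brand_id cu partl with
    | Sum.inl r => r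
    | Sum.inr p => pvScanMapping rest cu p

def get_brand_id_from_company_alt (company_name : String) : Option String :=
  if company_name == "" then none
  else pvScanMapping pvMapping (PySem.Str.upper company_name) none

-- ===== PRECONDITION & SPEC =====
def Spec_get_brand_id_from_company (company_name : String) (out : Option String) : Prop := out = get_brand_id_from_company_alt company_name
instance (company_name : String) (out : Option String) : Decidable (Spec_get_brand_id_from_company company_name out) := by unfold Spec_get_brand_id_from_company; infer_instance

-- ===== CLAIM (what is proved, stated in full; the proofs are below) =====
def Claim_equal_get_brand_id_from_company : Prop := ∀ (company_name : String), Dom_get_brand_id_from_company company_name → Spec_get_brand_id_from_company company_name (get_brand_id_from_company company_name)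

-- ===== LEMMAS AND PROOFS =====

-- B's inner single pass = A's inner exact scan, else the accumulator updated by A's inner partial scan.
theorem pvScanNames_eq (ns : List String) (b cu : String) (acc : Option String) :
    pvScanNames ns b cu acc =
      match ns.findSome? (fun n => if cu == PySem.Str.upper n then some b else none) with
      | some r => Sum.inl (some r)
      | none => Sum.inr (acc.or (ns.findSome? (fun n =>
          if PySem.Str.isIn (PySem.Str.upper n) cu || PySem.Str.isIn cu (PySem.Str.upper n)
          then some b else none)))
  := by
  induction ns generalizing acc with
  | nil => cases acc <;> rfl
  | cons n rest ih =>
    simp only [pvScanNames, List.findSome?_cons]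
    by_cases he : cu == PySem.Str.upper n
    · simp [he]
    · simp only [he, if_neg, Bool.false_eq_true, not_false_iff, ih]
      cases hp : (PySem.Str.isIn (PySem.Str.upper n) cu || PySem.Str.isIn cu (PySem.Str.upper n)) <;>
        cases acc <;> simp


-- B's single pass over the mapping = A's exact scan, else accumulator, else A's partial scan.
theorem pvScanMapping_eq (m : List (String × List String)) (c : String) (acc : Option String) :
    pvScanMapping m (PySem.Str.upper c) acc =
      match pvFindExactA m c with
      | some r => some r
      | none => acc.or (pvFindPartialA m (PySem.Str.upper c)) := by
  induction m generalizing acc with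
  | nil => cases acc <;> rfl
  | cons hd rest ih =>
    obtain ⟨b, ns⟩ := hd
    simp only [pvScanMapping, pvFindExactA, pvFindPartialA, pvScanNames_eq]
    cases hx : ns.findSome? (fun n =>
        if PySem.Str.upper c == PySem.Str.upper n then some b else none) with
    | some r => rfl
    | none =>
      dsimp only
      rw [ih]
      cases pvFindExactA rest c with
      | some r => rfl
      | none =>
        cases hp : ns.findSome? (fun n =>
            if PySem.Str.isIn (PySem.Str.upper n) (PySem.Str.upper c)
               || PySem.Str.isIn (PySem.Str.upper c) (PySem.Str.upper n) then some b else none) with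
        | some r => cases acc <;> rfl
        | none => cases acc <;> rfl

-- ===== VERDICT (by name: the statement is the Claim_ definition above) =====
theorem get_brand_id_from_company_spec : Claim_equal_get_brand_id_from_company := by
  intro company_name _
  unfold Spec_get_brand_id_from_company get_brand_id_from_company get_brand_id_from_company_alt
  by_cases h : company_name == ""
  · simp [h]
  · simp only [h, if_neg, Bool.false_eq_true, not_false_iff]
    rw [pvScanMapping_eq]
    cases pvFindExactA pvMapping company_name <;> rfl
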